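-- pv_equiv track=rewrite | github.com/jamesee/kattis | consultation_7Nov.py | nthAuspiciousNum
-- ===== SOURCE A (Python) =====
-- def nthAuspiciousNum(n: int) -> str:
--     num = ['8', '9']
--
--     result = ''
--     i = 1
--     while (n - (2**i -1 )) >= 0:
--         result = num[(n - (2**i - 1))//2**(i-1)  % 2] + result
--         i += 1
--     return result
-- ===== SOURCE B (Python) =====
-- def nthAuspiciousNum(n: int) -> str:
--     digits = []
--     while n > 0:
--         n -= 1
--         digits.append('8' if n % 2 == 0 else '9')
--         n //= 2
--     return ''.join(reversed(digits))
-- ===== Notes on version B (the rewrite author's own statement) =====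
-- stated objective: alternative
-- what changed: B converts n to bijective base-2 by repeated division (decrement, take the parity as the digit, halve), collecting digits least-significant first and reversing, instead of A's most-significant-first scan that extracts each digit with a positional quotient-and-remainder formula over growing powers of two.
import Mathlib
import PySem

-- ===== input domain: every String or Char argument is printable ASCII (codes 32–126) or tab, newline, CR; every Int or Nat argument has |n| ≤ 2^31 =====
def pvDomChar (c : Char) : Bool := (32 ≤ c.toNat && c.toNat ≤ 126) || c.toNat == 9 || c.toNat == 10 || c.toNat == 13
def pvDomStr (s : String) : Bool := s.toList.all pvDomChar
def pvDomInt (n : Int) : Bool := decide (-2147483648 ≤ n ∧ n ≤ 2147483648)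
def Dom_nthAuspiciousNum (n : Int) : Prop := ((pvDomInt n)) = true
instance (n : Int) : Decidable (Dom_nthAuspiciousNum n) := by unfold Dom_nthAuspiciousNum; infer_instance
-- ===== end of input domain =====

-- B rebuilds the number by repeated bijective-base-2 division (LSB first, then one reverse+join)
-- instead of A's most-significant-first positional formula with growing powers 2^i; objective: alternative.

-- ===== PORT A =====
-- while (n - (2**i - 1)) >= 0: result = num[(n - (2**i - 1))//2**(i-1) % 2] + result; i += 1
def nthLoopA (n : Int) (i : Nat) (result : String) : String :=
  if 0 ≤ n - (2 ^ i - 1) then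
    nthLoopA n (i + 1)
      (((PySem.List.pyGet? (["8", "9"] : List String)
          (PySem.Int.mod (PySem.Int.floordiv (n - (2 ^ i - 1)) (2 ^ (i - 1))) 2)).getD "") ++ result)
  else result
termination_by (n + 2 - 2 ^ i).toNat
decreasing_by
  have h1 : (0:Int) < 2 ^ i := pow_pos (by norm_num) i
  omega

def nthAuspiciousNum (n : Int) : String := nthLoopA n 1 ""

-- ===== PORT B =====
-- while n > 0: n -= 1; digits.append('8' if n % 2 == 0 else '9'); n //= 2
def altLoop (n : Int) (digits : List String) : List String :=
  if 0 < n then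
    altLoop (PySem.Int.floordiv (n - 1) 2)
      (digits ++ [if PySem.Int.mod (n - 1) 2 == 0 then "8" else "9"])
  else digits
termination_by n.toNat
decreasing_by
  rw [PySem.Int.floordiv_eq_ediv_of_pos (by norm_num)]
  omega

-- ''.join(reversed(digits))
def nthAuspiciousNum_alt (n : Int) : String := PySem.Str.join "" (altLoop n []).reverse

-- ===== PRECONDITION & SPEC =====
def Spec_nthAuspiciousNum (n : Int) (out : String) : Prop := out = nthAuspiciousNum_alt n
instance (n : Int) (out : String) : Decidable (Spec_nthAuspiciousNum n out) := by unfold Spec_nthAuspiciousNum; infer_instance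

-- ===== CLAIM (what is proved, stated in full; the proofs are below) =====
def Claim_equal_nthAuspiciousNum : Prop := ∀ (n : Int), Dom_nthAuspiciousNum n → Spec_nthAuspiciousNum n (nthAuspiciousNum n)

-- ===== LEMMAS AND PROOFS =====

-- ''.join on char lists is flatten
lemma intercalate_nil_eq_flatten (xs : List (List Char)) : [].intercalate xs = xs.flatten := by
  induction xs with
  | nil => simp [List.intercalate]
  | cons a r ih =>
    simp [List.intercalate] at ih ⊢
    cases r <;> simp_all [List.intersperse]

-- peeling the last digit off the reversed join
lemma join_reverse_cons (d : String) (L : List String) :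
    PySem.Str.join "" ((d :: L).reverse) = PySem.Str.join "" L.reverse ++ d := by
  apply String.toList_inj.mp
  simp [PySem.Str.toList_join, PySem.Chars.join, intercalate_nil_eq_flatten, String.toList_append]

-- the empty join is a left identity for ++
lemma join_nil_append (s : String) : PySem.Str.join "" ([] : List String) ++ s = s := by
  apply String.toList_inj.mp
  simp [PySem.Str.toList_join, PySem.Chars.join, intercalate_nil_eq_flatten, String.toList_append]

-- the loop guard at level j+2 for n matches the guard at level j+1 for (n-1)//2
lemma cond_shift (n : Int) (j : Nat) :
    (0 ≤ n - (2 ^ (j + 2) - 1)) ↔ (0 ≤ PySem.Int.floordiv (n - 1) 2 - (2 ^ (j + 1) - 1)) := by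
  rw [PySem.Int.floordiv_eq_ediv_of_pos (by norm_num)]
  have h1 : (0:Int) < 2 ^ (j + 1) := pow_pos (by norm_num) (j + 1)
  have h2 : (2:Int) ^ (j + 2) = 2 ^ (j + 1) * 2 := pow_succ 2 (j + 1)
  omega

-- the digit extracted at level j+2 for n equals the digit at level j+1 for (n-1)//2
lemma div_shift (n : Int) (j : Nat) :
    PySem.Int.floordiv (n - (2 ^ (j + 2) - 1)) (2 ^ (j + 1)) =
      PySem.Int.floordiv (PySem.Int.floordiv (n - 1) 2 - (2 ^ (j + 1) - 1)) (2 ^ j) := by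
  have hP : (0:Int) < 2 ^ j := pow_pos (by norm_num) j
  have hP1 : (0:Int) < 2 ^ (j + 1) := pow_pos (by norm_num) (j + 1)
  rw [PySem.Int.floordiv_eq_ediv_of_pos hP1, PySem.Int.floordiv_eq_ediv_of_pos (by norm_num : (0:Int) < 2),
      PySem.Int.floordiv_eq_ediv_of_pos hP]
  have e1 : (n - 1) / 2 - (2 ^ (j + 1) - 1) = (n - (2 ^ (j + 2) - 1)) / 2 := by
    have hstep := Int.add_mul_ediv_right (n - 1) (-(2 ^ (j + 1) - 1)) (show (2:Int) ≠ 0 by norm_num)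
    have h2 : (2:Int) ^ (j + 2) = 2 ^ (j + 1) * 2 := pow_succ 2 (j + 1)
    have harg : n - 1 + -(2 ^ (j + 1) - 1) * 2 = n - (2 ^ (j + 2) - 1) := by rw [h2]; ring
    rw [harg] at hstep
    omega
  rw [e1, Int.ediv_ediv_of_nonneg (show (0:Int) ≤ 2 by norm_num)]
  congr 1
  rw [pow_succ]
  ring

-- one whole pass of A's loop from level j+2 on n equals the pass from level j+1 on (n-1)//2
lemma shiftA (k : Nat) : ∀ (n : Int) (j : Nat) (s : String),
    (n + 2 - 2 ^ (j + 2)).toNat ≤ k →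
    nthLoopA n (j + 2) s = nthLoopA (PySem.Int.floordiv (n - 1) 2) (j + 1) s := by
  induction k with
  | zero =>
    intro n j s hk
    have h1 : (0:Int) < 2 ^ (j + 2) := pow_pos (by norm_num) (j + 2)
    have hc : ¬ (0 ≤ n - (2 ^ (j + 2) - 1)) := by omega
    conv_lhs => rw [nthLoopA]
    conv_rhs => rw [nthLoopA]
    rw [if_neg hc, if_neg ((cond_shift n j).not.mp hc)]
  | succ k ih =>
    intro n j s hk
    by_cases hc : 0 ≤ n - (2 ^ (j + 2) - 1)
    · conv_lhs => rw [nthLoopA]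
      conv_rhs => rw [nthLoopA]
      rw [if_pos hc, if_pos ((cond_shift n j).mp hc)]
      simp only [show j + 2 - 1 = j + 1 from rfl, show j + 1 - 1 = j from rfl]
      rw [← div_shift n j]
      exact ih n (j + 1) _ (by
        have h1 : (0:Int) < 2 ^ (j + 2) := pow_pos (by norm_num) (j + 2)
        have h2 : (2:Int) ^ (j + 1 + 2) = 2 ^ (j + 2) * 2 := pow_succ 2 (j + 2)
        omega)
    · conv_lhs => rw [nthLoopA]
      conv_rhs => rw [nthLoopA]
      rw [if_neg hc, if_neg ((cond_shift n j).not.mp hc)]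

-- accumulator lemma for B's loop
lemma altLoop_acc (k : Nat) : ∀ (n : Int), n.toNat ≤ k → ∀ (ds : List String),
    altLoop n ds = ds ++ altLoop n [] := by
  induction k with
  | zero =>
    intro n hn ds
    have h : ¬ 0 < n := by omega
    conv_lhs => rw [altLoop]
    conv_rhs => rw [altLoop]
    rw [if_neg h, if_neg h]
    simp
  | succ k ih =>
    intro n hn ds
    by_cases h : 0 < n
    · conv_lhs => rw [altLoop]
      conv_rhs => rw [altLoop]
      rw [if_pos h, if_pos h]
      have hlt : ((PySem.Int.floordiv (n - 1) 2)).toNat ≤ k := by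
        rw [PySem.Int.floordiv_eq_ediv_of_pos (by norm_num)]
        omega
      rw [ih _ hlt, ih _ hlt ([] ++ [_])]
      simp
    · conv_lhs => rw [altLoop]
      conv_rhs => rw [altLoop]
      rw [if_neg h, if_neg h]
      simp

-- main invariant: A's loop from level 1 produces B's string, prepended to the accumulator
lemma mainA (k : Nat) : ∀ (n : Int), n.toNat ≤ k → ∀ (s : String),
    nthLoopA n 1 s = PySem.Str.join "" (altLoop n []).reverse ++ s := by
  induction k with
  | zero =>
    intro n hn s
    have hc : ¬ (0 ≤ n - (2 ^ 1 - 1)) := by omega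
    have h' : ¬ 0 < n := by omega
    conv_lhs => rw [nthLoopA]
    conv_rhs => rw [altLoop]
    rw [if_neg hc, if_neg h', List.reverse_nil, join_nil_append]
  | succ k ih =>
    intro n hn s
    by_cases h : 0 < n
    · have hc : 0 ≤ n - (2 ^ 1 - 1) := by omega
      conv_lhs => rw [nthLoopA]
      rw [if_pos hc]
      have hd1 : PySem.Int.floordiv (n - (2 ^ 1 - 1)) (2 ^ (1 - 1)) = n - 1 := by
        rw [PySem.Int.floordiv_eq_ediv_of_pos (by norm_num : (0:Int) < 2 ^ (1 - 1))]
        simp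
      rw [hd1]
      have hn' : (PySem.Int.floordiv (n - 1) 2).toNat ≤ k := by
        rw [PySem.Int.floordiv_eq_ediv_of_pos (by norm_num)]
        omega
      have hB : altLoop n [] =
          (if PySem.Int.mod (n - 1) 2 == 0 then "8" else "9") ::
            altLoop (PySem.Int.floordiv (n - 1) 2) [] := by
        conv_lhs => rw [altLoop]
        rw [if_pos h]
        simpa using altLoop_acc k _ hn' ([] ++ [_])
      have hshift := shiftA k n 0
        ((PySem.List.pyGet? (["8", "9"] : List String) (PySem.Int.mod (n - 1) 2)).getD "" ++ s)
        (by have h2 : (2:Int) ^ (0 + 2) = 4 := by norm_num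
            omega)
      rw [show (0:Nat) + 2 = 2 from rfl, show (0:Nat) + 1 = 1 from rfl] at hshift
      rw [hshift, ih _ hn', hB, join_reverse_cons, String.append_assoc]
      have hm : PySem.Int.mod (n - 1) 2 = 0 ∨ PySem.Int.mod (n - 1) 2 = 1 := by
        rw [PySem.Int.mod_eq_emod_of_pos (by norm_num)]
        omega
      rcases hm with hm | hm <;> rw [hm] <;> rfl
    · have hc : ¬ (0 ≤ n - (2 ^ 1 - 1)) := by omega
      conv_lhs => rw [nthLoopA]
      conv_rhs => rw [altLoop]
      rw [if_neg hc, if_neg h, List.reverse_nil, join_nil_append]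

-- ===== VERDICT (by name: the statement is the Claim_ definition above) =====
theorem nthAuspiciousNum_spec : Claim_equal_nthAuspiciousNum := by
  intro n _
  unfold Spec_nthAuspiciousNum nthAuspiciousNum nthAuspiciousNum_alt
  exact (mainA n.toNat n (le_refl _) "").trans (by simp)
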